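-- pv_equiv track=rewrite | github.com/benquick123/code-profiling | code/batch-2/vse-naloge-brez-testov/DN6-Z-077.py | prestej_tvite
-- ===== SOURCE A (Python) =====
-- def pomozna(tvit1):
--     pozicija =tvit1.index(":")
--     return tvit1[:pozicija]
--
-- def prestej_tvite(tviti):
--     slovar ={}
--     for t in tviti:
--         ime = pomozna(t)
--         if ime in slovar.keys():
--             slovar[ime] += 1
--         else:
--             slovar[ime] = 1
--
--     return slovar
-- ===== SOURCE B (Python) =====
-- def prestej_tvite(tviti):
--     imena = [t[:t.index(":")] for t in tviti]
--     return {ime: imena.count(ime) for ime in imena}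
-- ===== Notes on version B (the rewrite author's own statement) =====
-- stated objective: simpler
-- what changed: Replaced the explicit loop with contains-check and in-place increment by two comprehensions: extract all prefixes once, then a dict comprehension keyed on the prefixes with list.count as the value.
import Mathlib
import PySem

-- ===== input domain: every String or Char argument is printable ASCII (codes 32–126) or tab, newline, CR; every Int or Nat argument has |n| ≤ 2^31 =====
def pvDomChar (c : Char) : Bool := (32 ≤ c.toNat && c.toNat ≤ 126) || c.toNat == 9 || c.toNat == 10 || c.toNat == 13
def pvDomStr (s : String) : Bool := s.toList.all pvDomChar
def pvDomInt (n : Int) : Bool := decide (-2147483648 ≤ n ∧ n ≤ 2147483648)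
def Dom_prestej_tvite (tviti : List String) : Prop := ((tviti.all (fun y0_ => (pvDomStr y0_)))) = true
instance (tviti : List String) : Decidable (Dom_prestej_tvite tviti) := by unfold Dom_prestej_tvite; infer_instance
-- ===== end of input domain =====

-- B replaces A's in-place dict accumulation with two comprehensions (all prefixes, then a
-- dict comprehension counting each with list.count); objective: simpler, not faster.

-- ===== PORT A =====
-- tvit1.index(":") raises ValueError when ":" is absent; PySem.Str.find returns -1 there,
-- and exactly those inputs are excluded by Pre_ below. Exact on Pre_.
def pomozna (tvit1 : String) : String :=
  let pozicija := PySem.Str.find tvit1 ":"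
  PySem.Str.slice tvit1 none (some pozicija)

def prestej_tvite (tviti : List String) : List (String × Int) :=
  (tviti.foldl (fun slovar t =>
      let ime := pomozna t
      if slovar.contains ime then slovar.insert ime (slovar.getD ime 0 + 1)
      else slovar.insert ime 1)
    (PySem.Dict.empty : PySem.Dict String Int)).items

-- ===== PORT B =====
def prestej_tvite_alt (tviti : List String) : List (String × Int) :=
  let imena := tviti.map (fun t => PySem.Str.slice t none (some (PySem.Str.find t ":")))
  (imena.foldl (fun d ime => d.insert ime ((imena.count ime : Nat) : Int))
    (PySem.Dict.empty : PySem.Dict String Int)).items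

-- ===== PRECONDITION & SPEC =====
-- Pre_ excludes inputs containing a tweet without ":", on which Python's str.index raises ValueError.
def Pre_prestej_tvite (tviti : List String) : Prop :=
  ∀ t ∈ tviti, PySem.Str.isIn ":" t = true
instance (tviti : List String) : Decidable (Pre_prestej_tvite tviti) := by
  unfold Pre_prestej_tvite; infer_instance

def pvWitness_prestej_tvite : List String := ["ana: zivjo", "bor: hej", "ana: spet jaz"]

def Spec_prestej_tvite (tviti : List String) (out : List (String × Int)) : Prop := out = prestej_tvite_alt tviti
instance (tviti : List String) (out : List (String × Int)) : Decidable (Spec_prestej_tvite tviti out) := by unfold Spec_prestej_tvite; infer_instance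

-- ===== CLAIM (what is proved, stated in full; the proofs are below) =====
def Claim_equal_prestej_tvite : Prop := ∀ (tviti : List String), Dom_prestej_tvite tviti → Pre_prestej_tvite tviti → Spec_prestej_tvite tviti (prestej_tvite tviti)

-- ===== LEMMAS AND PROOFS =====

-- A fold of inserts whose value depends only on the key: the final lookup is that value.
theorem getD_foldl_insert_keyfun (l : List String) (v : String → Int)
    (d : PySem.Dict String Int) (k : String) (d0 : Int) :
    (l.foldl (fun d x => d.insert x (v x)) d).getD k d0
      = if k ∈ l then v k else d.getD k d0 := by
  induction l generalizing d with
  | nil => simp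
  | cons x xs ih =>
    simp only [List.foldl_cons, ih, List.mem_cons]
    by_cases hx : k ∈ xs
    · simp [hx]
    · by_cases hk : k = x
      · simp [hk, PySem.Dict.getD_insert_self]
      · simp [hx, hk, PySem.Dict.getD_insert_of_ne _ _ _ hk]

-- B's dict-comprehension fold, as items over the distinct keys in first-occurrence order.
theorem items_foldl_insert_keyfun (l : List String) (v : String → Int) :
    ((l.foldl (fun d x => d.insert x (v x)) (PySem.Dict.empty : PySem.Dict String Int)).items)
      = (PySem.Set.ofList l).map (fun k => (k, v k)) := by
  have hkeys : ((l.foldl (fun d x => d.insert x (v x))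
      (PySem.Dict.empty : PySem.Dict String Int)).keys) = PySem.Set.ofList l := by
    rw [PySem.Dict.keys_foldl_insert l (fun _ x => v x)]; rfl
  have hnd : ((l.foldl (fun d x => d.insert x (v x))
      (PySem.Dict.empty : PySem.Dict String Int)).keys).Nodup := by
    rw [hkeys]; exact PySem.Set.nodup_ofList l
  rw [PySem.Dict.items_eq_map_keys _ hnd 0, hkeys]
  refine List.map_congr_left (fun k hk => ?_)
  have hmem : k ∈ l := (PySem.Set.mem_ofList l k).mp hk
  rw [getD_foldl_insert_keyfun l v _ k 0, if_pos hmem]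

-- the shared prefix-extraction, named for the proofs only
def pvKey (t : String) : String := PySem.Str.slice t none (some (PySem.Str.find t ":"))

-- A's loop, re-read as the counter fold over the extracted prefixes.
theorem foldA_eq (l : List String) (d : PySem.Dict String Int) :
    l.foldl (fun slovar t =>
      if slovar.contains (pvKey t) then slovar.insert (pvKey t) (slovar.getD (pvKey t) 0 + 1)
      else slovar.insert (pvKey t) 1) d
    = (l.map pvKey).foldl (fun d x => d.insert x (d.getD x 0 + 1)) d := by
  induction l generalizing d with
  | nil => rfl
  | cons x xs ih =>
    simp only [List.foldl_cons, List.map_cons]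
    rw [← ih]
    by_cases h : d.contains (pvKey x) = true
    · simp [h]
    · simp only [Bool.not_eq_true] at h
      rw [if_neg (by simp [h]), PySem.Dict.getD_of_not_contains d 0 h]
      norm_num

-- ===== VERDICT (by name: the statement is the Claim_ definition above) =====
theorem prestej_tvite_spec : Claim_equal_prestej_tvite := by
  intro tviti _ _
  show prestej_tvite tviti = prestej_tvite_alt tviti
  show (tviti.foldl (fun slovar t =>
      if slovar.contains (pvKey t) then slovar.insert (pvKey t) (slovar.getD (pvKey t) 0 + 1)
      else slovar.insert (pvKey t) 1) (PySem.Dict.empty : PySem.Dict String Int)).items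
    = ((tviti.map pvKey).foldl
        (fun d ime => d.insert ime (((tviti.map pvKey).count ime : Nat) : Int))
        (PySem.Dict.empty : PySem.Dict String Int)).items
  rw [foldA_eq, PySem.Dict.foldl_insert_getD_add_one_eq_counter, PySem.Dict.items_counter,
      items_foldl_insert_keyfun]
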